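-- pv_equiv track=rewrite | github.com/MayroseLab/ChromevolScripts | Chromevol_scripts/ChromEvol_defs.py | largest_value_hash_median
-- ===== SOURCE A (Python) =====
-- def conf_interval(sortedArr, interval):
-- 	# sub confidence interval
-- 	# recieves an array (reference) and an interval (between 0 and 1) and returns the corresponding percentile
-- 	n = len(sortedArr)
-- 	index = round(n * interval)
-- 	if index > n - 1:
-- 		index -= 1
-- 	bound = sortedArr[index]
-- 	return bound
--
-- def largest_value_hash_median(hash):
--
-- 	big=0
-- 	best=[]
-- 	for key in hash.keys():
-- 		if hash[key] > big:
-- 			big = hash[key]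
-- 			best.append(key)
-- 		elif hash[key] == big:
-- 			best.append(key)
-- 	best.sort()
-- 	median = conf_interval(best,0.5)
--
-- 	return median
-- ===== SOURCE B (Python) =====
-- def _select(arr, i):
--     # quickselect: i-th smallest element (0-based) of a list of distinct values
--     pivot = arr[0]
--     lo = [x for x in arr if x < pivot]
--     if i < len(lo):
--         return _select(lo, i)
--     if i == len(lo):
--         return pivot
--     return _select([x for x in arr if x > pivot], i - len(lo) - 1)
--
-- def largest_value_hash_median(hash):
--     # one pass over the items collects each key whose value ties or beats the running maximum
--     best = []
--     top = 0
--     for key, val in hash.items():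
--         if val >= top:
--             top = val
--             best.append(key)
--     # the 0.5-percentile bound of the collected keys, selected without sorting
--     return _select(best, round(len(best) * 0.5))
-- ===== Notes on version B (the rewrite author's own statement) =====
-- stated objective: alternative
-- what changed: B collects the running-max keys in one pass over the dict items (instead of A's key iteration with a lookup per key) and selects the 0.5-percentile key by quickselect instead of A's full sort plus indexing; Pre_ excludes inputs with no non-negative value, where both implementations raise IndexError, and (in the Lean model) association lists with duplicate keys, which do not represent a dict.
import Mathlib
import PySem

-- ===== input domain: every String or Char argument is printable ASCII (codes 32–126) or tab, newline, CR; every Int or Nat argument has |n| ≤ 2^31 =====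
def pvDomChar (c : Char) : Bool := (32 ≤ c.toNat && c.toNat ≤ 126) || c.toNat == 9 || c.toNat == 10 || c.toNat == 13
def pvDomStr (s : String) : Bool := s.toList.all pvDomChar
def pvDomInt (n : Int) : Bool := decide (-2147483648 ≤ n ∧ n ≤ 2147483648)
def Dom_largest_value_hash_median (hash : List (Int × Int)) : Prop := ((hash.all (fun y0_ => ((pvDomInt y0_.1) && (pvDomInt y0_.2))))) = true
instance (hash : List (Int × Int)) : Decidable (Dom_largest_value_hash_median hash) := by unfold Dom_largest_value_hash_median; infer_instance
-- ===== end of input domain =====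

-- B selects the 0.5-percentile key by quickselect instead of A's full sort + indexing
-- (objective: alternative algorithm; the running-max collection is one pass over the items).

-- ===== PORT A =====
-- conf_interval(sortedArr, interval) is called only with interval = 0.5. round(n * 0.5) is
-- Python float rounding; exact here (n is a list length), half-integers round to even,
-- transcribed by integer parity.
def conf_interval (sortedArr : List Int) : Int :=
  let n : Int := sortedArr.length
  let index : Int := if n % 2 = 0 then n / 2 else (if (n / 2) % 2 = 0 then n / 2 else n / 2 + 1)
  let index := if index > n - 1 then index - 1 else index
  -- sortedArr[index]: IndexError (pyGet? = none) only outside Pre_; .getD 0 is never the value returned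
  (PySem.List.pyGet? sortedArr index).getD 0

-- A iterates hash.keys() and looks up hash[key]; dict keys are unique, so this is a fold over the items.
def largest_value_hash_median (hash : List (Int × Int)) : Int :=
  let st := hash.foldl (fun (st : Int × List Int) kv =>
      if kv.2 > st.1 then (kv.2, st.2 ++ [kv.1])
      else if kv.2 = st.1 then (st.1, st.2 ++ [kv.1])
      else st) (0, [])
  conf_interval (PySem.List.sorted st.2 (fun x => x) false)

-- ===== PORT B =====
-- _select: quickselect, i-th smallest of a distinct-element list; arr = [] is Python's
-- IndexError (arr[0]), outside Pre_, returned as 0 here.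
def qselect (arr : List Int) (i : Int) : Int :=
  match arr with
  | [] => 0
  | pivot :: rest =>
    let lo := (pivot :: rest).filter (fun x => decide (x < pivot))
    if i < (lo.length : Int) then qselect lo i
    else if i = (lo.length : Int) then pivot
    else qselect ((pivot :: rest).filter (fun x => decide (pivot < x))) (i - lo.length - 1)
termination_by arr.length
decreasing_by
  · simp only [List.filter_cons, decide_eq_true_eq, lt_irrefl, if_false, List.length_cons]
    have := List.length_filter_le (fun x => decide (x < pivot)) rest
    simp_all
  · simp only [List.filter_cons, decide_eq_true_eq, lt_irrefl, if_false, List.length_cons]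
    have := List.length_filter_le (fun x => decide (pivot < x)) rest
    simp_all

-- Source B's round(n * 0.5), ported by hand: n is a list length (0 ≤ n ≤ 2^31), so n * 0.5 is an
-- exact float and Python rounds half-integers to even — exactly this integer-parity expression.
def pyRoundHalf (n : Int) : Int :=
  if n % 2 = 0 then n / 2 else (if (n / 2) % 2 = 0 then n / 2 else n / 2 + 1)

def largest_value_hash_median_alt (hash : List (Int × Int)) : Int :=
  let st := hash.foldl (fun (st : Int × List Int) kv =>
      if kv.2 ≥ st.1 then (kv.2, st.2 ++ [kv.1]) else st) (0, [])
  qselect st.2 (pyRoundHalf st.2.length)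

-- ===== PRECONDITION & SPEC =====
-- Pre_ excludes (a) inputs where A raises IndexError (no entry with a non-negative value, incl. the
-- empty dict: `best` stays empty and best[index] raises; B's quickselect raises there too), and
-- (b) association lists with duplicate keys, which do not represent a Python dict.
def Pre_largest_value_hash_median (hash : List (Int × Int)) : Prop :=
  (hash.map Prod.fst).Nodup ∧ ∃ kv ∈ hash, 0 ≤ kv.2
instance (hash : List (Int × Int)) : Decidable (Pre_largest_value_hash_median hash) := by
  unfold Pre_largest_value_hash_median; infer_instance

def pvWitness_largest_value_hash_median : (List (Int × Int)) := [(1, 5), (2, 3), (3, 5)]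

def Spec_largest_value_hash_median (hash : List (Int × Int)) (out : Int) : Prop := out = largest_value_hash_median_alt hash
instance (hash : List (Int × Int)) (out : Int) : Decidable (Spec_largest_value_hash_median hash out) := by unfold Spec_largest_value_hash_median; infer_instance

-- ===== CLAIM (what is proved, stated in full; the proofs are below) =====
def Claim_equal_largest_value_hash_median : Prop := ∀ (hash : List (Int × Int)), Dom_largest_value_hash_median hash → Pre_largest_value_hash_median hash → Spec_largest_value_hash_median hash (largest_value_hash_median hash)

-- ===== LEMMAS AND PROOFS =====

-- The two collection loops compute the same state: v > big appends and updates, v = big appends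
-- (and "updating" big to the equal v is a no-op), so both are "v ≥ big".
lemma fold_funs_eq :
    (fun (st : Int × List Int) (kv : Int × Int) =>
      if kv.2 > st.1 then (kv.2, st.2 ++ [kv.1])
      else if kv.2 = st.1 then (st.1, st.2 ++ [kv.1])
      else st)
    = (fun (st : Int × List Int) (kv : Int × Int) =>
      if kv.2 ≥ st.1 then (kv.2, st.2 ++ [kv.1]) else st) := by
  funext st kv
  split_ifs with h1 h2 h3 h4 <;> simp_all <;> omega

-- the collected key list is a sublist of best ++ keys
lemma fold_snd_sublist (hash : List (Int × Int)) :
    ∀ (big : Int) (best : List Int),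
      (hash.foldl (fun (st : Int × List Int) kv =>
        if kv.2 ≥ st.1 then (kv.2, st.2 ++ [kv.1]) else st) (big, best)).2.Sublist
        (best ++ hash.map Prod.fst) := by
  induction hash with
  | nil => intro big best; simp
  | cons kv t ih =>
    intro big best
    simp only [List.foldl_cons, List.map_cons]
    split_ifs with h
    · exact (ih kv.2 (best ++ [kv.1])).trans (by simp)
    · exact (ih big best).trans (by simp)

lemma fold_snd_nil (hash : List (Int × Int)) :
    ∀ (big : Int) (best : List Int),
      (hash.foldl (fun (st : Int × List Int) kv =>
        if kv.2 ≥ st.1 then (kv.2, st.2 ++ [kv.1]) else st) (big, best)).2 = [] →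
      best = [] ∧ ∀ kv ∈ hash, kv.2 < big := by
  induction hash with
  | nil => intro big best h; simpa using h
  | cons kv t ih =>
    intro big best h
    simp only [List.foldl_cons] at h
    split_ifs at h with hc
    · rcases ih _ _ h with ⟨habs, _⟩
      simp at habs
    · rcases ih _ _ h with ⟨h1, h2⟩
      refine ⟨h1, ?_⟩
      intro x hx
      cases hx with
      | head => omega
      | tail _ hx => exact h2 _ hx


-- quickselect of a distinct-element list is indexing into its sort
lemma qselect_eq_sorted_getD :
    ∀ (N : Nat) (l : List Int), l.length ≤ N → l.Nodup → ∀ (i : Nat), i < l.length →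
      qselect l (i : Int) = (PySem.List.sorted l (fun x => x) false).getD i 0 := by
  intro N
  induction N with
  | zero => intro l hN _ i hi; omega
  | succ N ih =>
    intro l hN hnd i hi
    cases l with
    | nil => simp at hi
    | cons p rest =>
      simp only [List.length_cons] at hN hi
      obtain ⟨hp, hrest⟩ := List.nodup_cons.mp hnd
      set lo := rest.filter (fun x => decide (x < p)) with hlo
      set hi' := rest.filter (fun x => decide (p < x)) with hhi
      have hfl : (p :: rest).filter (fun x => decide (x < p)) = lo := by
        simp [hlo]
      have hfh : (p :: rest).filter (fun x => decide (p < x)) = hi' := by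
        simp [hhi]
      have hnotlt : rest.filter (fun x => !decide (x < p)) = hi' := by
        rw [hhi]
        apply List.filter_congr
        intro x hx
        have hxp : x ≠ p := fun h => hp (h ▸ hx)
        by_cases h : x < p
        · have hpx : ¬ p < x := by omega
          simp [h, hpx]
        · have hpx : p < x := by omega
          simp [h, hpx]
      have hperm : (lo ++ p :: hi').Perm (p :: rest) := by
        have h1 : (lo ++ hi').Perm rest := by
          rw [← hnotlt, hlo]; exact List.filter_append_perm _ rest
        exact List.perm_middle.trans (h1.cons p)
      have hlen : rest.length = lo.length + hi'.length := by
        have := hperm.length_eq; simp at this; omega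
      have hmem_lo : ∀ x ∈ lo, x < p := by
        intro x hx; rw [hlo] at hx; simp [List.mem_filter] at hx; exact hx.2
      have hmem_hi : ∀ x ∈ hi', p < x := by
        intro x hx; rw [hhi] at hx; simp [List.mem_filter] at hx; exact hx.2
      have hnd_lo : lo.Nodup := hrest.filter _
      have hnd_hi : hi'.Nodup := hrest.filter _
      have hslo := PySem.List.sorted_perm (xs := lo) (key := fun x => x) (rev := false)
      have hshi := PySem.List.sorted_perm (xs := hi') (key := fun x => x) (rev := false)
      have hsorted : PySem.List.sorted (p :: rest) (fun x => x) false
          = PySem.List.sorted lo (fun x => x) false ++ p :: PySem.List.sorted hi' (fun x => x) false := by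
        apply PySem.List.sorted_eq_of_perm_of_pairwise_lt
        · exact (hslo.append (hshi.cons p)).trans hperm
        · rw [List.pairwise_append]
          refine ⟨?_, ?_, ?_⟩
          · have hle := PySem.List.sorted_pairwise (xs := lo) (key := fun x => x)
            have hne : (PySem.List.sorted lo (fun x => x) false).Pairwise (· ≠ ·) :=
              (hslo.symm.nodup hnd_lo)
            exact (hle.and hne).imp (fun h => lt_of_le_of_ne h.1 h.2)
          · rw [List.pairwise_cons]
            refine ⟨fun y hy => hmem_hi y (hshi.mem_iff.mp hy), ?_⟩
            have hle := PySem.List.sorted_pairwise (xs := hi') (key := fun x => x)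
            have hne : (PySem.List.sorted hi' (fun x => x) false).Pairwise (· ≠ ·) :=
              (hshi.symm.nodup hnd_hi)
            exact (hle.and hne).imp (fun h => lt_of_le_of_ne h.1 h.2)
          · intro x hx y hy
            have hxlo : x < p := hmem_lo x (hslo.mem_iff.mp hx)
            rcases List.mem_cons.mp hy with rfl | hy'
            · exact hxlo
            · exact lt_trans hxlo (hmem_hi y (hshi.mem_iff.mp hy'))
      have hlslo : (PySem.List.sorted lo (fun x => x) false).length = lo.length := by
        exact hslo.length_eq
      rw [qselect]
      simp only [hfl, hfh]
      split_ifs with h1 h2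
      · -- i < lo.length : recurse left
        have hiN : i < lo.length := by exact_mod_cast h1
        rw [hsorted, List.getD_append _ _ _ _ (by rw [hlslo]; exact hiN)]
        exact ih lo (by have := List.length_filter_le (fun x => decide (x < p)) rest; simp [hlo]; omega)
          hnd_lo i hiN
      · -- i = lo.length : the pivot
        have hiN : i = lo.length := by exact_mod_cast h2
        rw [hsorted, List.getD_append_right _ _ _ _ (by omega)]
        simp [hlslo, hiN]
      · -- i > lo.length : recurse right
        have hiN : lo.length < i := by
          rcases lt_trichotomy (i : Int) (lo.length : Int) with h | h | h
          · exact absurd h h1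
          · exact absurd h h2
          · exact_mod_cast h
        have hcast : (i : Int) - (lo.length : Int) - 1 = ((i - lo.length - 1 : Nat) : Int) := by
          omega
        rw [hcast, hsorted, List.getD_append_right _ _ _ _ (by rw [hlslo]; omega)]
        have hpos : i - (PySem.List.sorted lo (fun x => x) false).length = (i - lo.length - 1) + 1 := by
          rw [hlslo]; omega
        rw [hpos, List.getD_cons_succ]
        have hilen : i < rest.length + 1 := by simpa using hi
        exact ih hi' (by have := List.length_filter_le (fun x => decide (p < x)) rest; simp [hhi]; omega)
          hnd_hi (i - lo.length - 1) (by omega)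

-- close one index case: both sides index the sorted list at the same natural position
lemma index_case_close (xs : List Int) (hnd : xs.Nodup) (j : Nat) (hj : j < xs.length)
    (iA iB : Int) (hA : iA = (j : Int)) (hB : iB = (j : Int)) :
    (PySem.List.pyGet? (PySem.List.sorted xs (fun x => x) false) iA).getD 0 = qselect xs iB := by
  subst hA; subst hB
  rw [qselect_eq_sorted_getD xs.length xs le_rfl hnd j hj]
  simp [List.getD_eq_getElem?_getD]

-- ===== VERDICT (by name: the statement is the Claim_ definition above) =====
theorem largest_value_hash_median_spec : Claim_equal_largest_value_hash_median := by
  intro hash _ hpre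
  obtain ⟨hnodup, kv, hkv, hkv2⟩ := hpre
  simp only [Spec_largest_value_hash_median, largest_value_hash_median,
    largest_value_hash_median_alt, conf_interval, pyRoundHalf, fold_funs_eq]
  set st := hash.foldl (fun (st : Int × List Int) kv =>
      if kv.2 ≥ st.1 then (kv.2, st.2 ++ [kv.1]) else st) (0, []) with hst
  have hbnd : st.2.Nodup :=
    List.Sublist.nodup (by simpa using fold_snd_sublist hash 0 []) hnodup
  have hbne : st.2 ≠ [] := by
    intro h
    obtain ⟨-, hall⟩ := fold_snd_nil hash 0 [] h
    have := hall kv hkv; omega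
  have hm : 0 < st.2.length := List.length_pos_iff.mpr hbne
  simp only [PySem.List.length_sorted]
  split_ifs with h1 h2 h3 h4 h5 <;>
    first
      | omega
      | (apply index_case_close st.2 hbnd (st.2.length / 2) (by omega) _ _ (by omega) (by omega))
      | (apply index_case_close st.2 hbnd (st.2.length / 2 + 1) (by omega) _ _ (by omega) (by omega))
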